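-- pv_equiv track=rewrite | github.com/sakshay2318/Brute-Force-Attack-Detection-Using-Machine-Learning | main.py | assign_numbers
-- ===== SOURCE A (Python) =====
-- def assign_numbers(ip_addresses):
--  prev_ip = None
--  prev_num = 0
--  output = []
--  for ip in ip_addresses:
--      if prev_ip is None:
--          prev_ip = ip
--          output.append(prev_num)
--      elif prev_ip != ip:
--          prev_ip = ip
--          if prev_num == 0:
--              prev_num = 1
--          else:
--             prev_num = 0
--          output.append(prev_num)
--      else:
--          output.append(prev_num)
--  return output
-- ===== SOURCE B (Python) =====
-- from itertools import accumulate
--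
-- def assign_numbers(ip_addresses):
--     if not ip_addresses:
--         return []
--     # staged passes: pairwise change indicators, running count of changes, parity
--     flags = [0] + [1 if b != a else 0 for a, b in zip(ip_addresses, ip_addresses[1:])]
--     return [s % 2 for s in accumulate(flags)]
-- ===== Notes on version B (the rewrite author's own statement) =====
-- stated objective: alternative
-- what changed: Replaces A's one-pass prev_ip/prev_num toggle state machine by three staged passes: pairwise-zip change indicators, a running prefix sum counting change points, and a parity map (label i = number of changes in the first i+1 elements mod 2).
import Mathlib
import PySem

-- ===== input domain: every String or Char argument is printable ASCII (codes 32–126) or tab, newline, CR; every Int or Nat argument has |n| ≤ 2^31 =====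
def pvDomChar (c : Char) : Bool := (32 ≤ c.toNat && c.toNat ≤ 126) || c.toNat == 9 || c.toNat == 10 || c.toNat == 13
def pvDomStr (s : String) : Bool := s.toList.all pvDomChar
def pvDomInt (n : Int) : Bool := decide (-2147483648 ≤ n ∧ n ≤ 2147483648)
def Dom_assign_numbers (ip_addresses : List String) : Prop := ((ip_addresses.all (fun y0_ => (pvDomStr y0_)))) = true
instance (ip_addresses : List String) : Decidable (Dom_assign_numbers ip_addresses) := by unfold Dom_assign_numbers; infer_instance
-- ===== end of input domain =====

-- B replaces A's carried prev_ip/prev_num toggle by three staged passes: pairwise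
-- change indicators, a prefix sum counting change points, and a parity map (alternative).


-- ===== PORT A =====
-- the loop of A: state is (prev_ip, prev_num, output), branches in A's order
def assignLoop (prevIp : Option String) (prevNum : Int) (output : List Int) :
    List String → List Int
  | [] => output
  | ip :: rest =>
    match prevIp with
    | none => assignLoop (some ip) prevNum (output ++ [prevNum]) rest
    | some p =>
      if p ≠ ip then
        let newNum : Int := if prevNum = 0 then 1 else 0
        assignLoop (some ip) newNum (output ++ [newNum]) rest
      else
        assignLoop (some p) prevNum (output ++ [prevNum]) rest

def assign_numbers (ip_addresses : List String) : List Int :=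
  assignLoop none 0 [] ip_addresses

-- ===== PORT B =====
-- itertools.accumulate with the running sum as explicit state
def pyAccumulate (acc : Int) : List Int → List Int
  | [] => []
  | c :: cs => (acc + c) :: pyAccumulate (acc + c) cs

def assign_numbers_alt (ip_addresses : List String) : List Int :=
  match ip_addresses with
  | [] => []
  | _ =>
    let flags : List Int :=
      0 :: (ip_addresses.zip ip_addresses.tail).map
        (fun ab => if ab.2 ≠ ab.1 then 1 else 0)
    (pyAccumulate 0 flags).map (fun s => s % 2)

-- ===== PRECONDITION & SPEC =====
def Spec_assign_numbers (ip_addresses : List String) (out : List Int) : Prop := out = assign_numbers_alt ip_addresses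
instance (ip_addresses : List String) (out : List Int) : Decidable (Spec_assign_numbers ip_addresses out) := by unfold Spec_assign_numbers; infer_instance

-- ===== CLAIM (what is proved, stated in full; the proofs are below) =====
def Claim_equal_assign_numbers : Prop := ∀ (ip_addresses : List String), Dom_assign_numbers ip_addresses → Spec_assign_numbers ip_addresses (assign_numbers ip_addresses)

-- ===== LEMMAS AND PROOFS =====

-- change indicators of a list relative to a previous element
def chFlags (p : String) : List String → List Int
  | [] => []
  | y :: ys => (if y ≠ p then 1 else 0) :: chFlags y ys

theorem zip_map_eq_chFlags : ∀ (ys : List String) (p : String),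
    ((p :: ys).zip ys).map (fun ab => if ab.2 ≠ ab.1 then (1 : Int) else 0)
      = chFlags p ys := by
  intro ys
  induction ys with
  | nil => intro p; simp [chFlags]
  | cons y ys ih =>
    intro p
    simp only [List.zip_cons_cons, List.map_cons, ih y, chFlags]

theorem parity_succ (s : Int) :
    (if s % 2 = 0 then (1 : Int) else 0) = (s + 1) % 2 := by
  rcases Int.emod_two_eq s with h | h <;> simp [h] <;> omega

theorem assignLoop_eq_accum : ∀ (ys : List String) (p : String) (s : Int) (output : List Int),
    assignLoop (some p) (s % 2) output ys
      = output ++ (pyAccumulate s (chFlags p ys)).map (fun t => t % 2) := by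
  intro ys
  induction ys with
  | nil => intro p s output; simp [assignLoop, chFlags, pyAccumulate]
  | cons y ys ih =>
    intro p s output
    by_cases h : p = y
    · subst h
      show (if p ≠ p then _ else assignLoop (some p) (s % 2) (output ++ [s % 2]) ys) = _
      rw [if_neg (by simp), ih p s]
      simp [chFlags, pyAccumulate, List.append_assoc]
    · have h' : y ≠ p := fun hy => h hy.symm
      show (if p ≠ y then
              assignLoop (some y) (if s % 2 = 0 then 1 else 0)
                (output ++ [if s % 2 = 0 then 1 else 0]) ys
            else _) = _
      rw [if_pos h, parity_succ, ih y (s + 1)]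
      simp [chFlags, h', pyAccumulate, List.append_assoc]

theorem assign_eq_alt (xs : List String) : assign_numbers xs = assign_numbers_alt xs := by
  cases xs with
  | nil => rfl
  | cons x xs =>
    show assignLoop (some x) 0 [0] xs = assign_numbers_alt (x :: xs)
    have h := assignLoop_eq_accum xs x 0 [0]
    norm_num at h
    rw [h]
    show _ = assign_numbers_alt (x :: xs)
    unfold assign_numbers_alt
    rw [show (x :: xs).tail = xs from rfl, zip_map_eq_chFlags xs x]
    norm_num [pyAccumulate]

-- ===== VERDICT (by name: the statement is the Claim_ definition above) =====
theorem assign_numbers_spec : Claim_equal_assign_numbers := by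
  intro xs _
  unfold Spec_assign_numbers
  exact assign_eq_alt xs
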